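-- pv_equiv track=rewrite | github.com/KarenSuarez4/Cifrador-por-bloques- | transposition.py | transposicion_inversa
-- ===== SOURCE A (Python) =====
-- def _mcd(a: int, b: int) -> int:
--     """Calcula el máximo común divisor mediante algoritmo de Euclides."""
--     while b:
--         a, b = b, a % b
--     return a
--
-- def _params_transposicion(K_r: int, n: int) -> tuple:
--     """Deriva parámetros de permutación válidos para longitud `n`.
--
--     Args:
--         K_r: Subclave de ronda.
--         n: Longitud del bloque.
--
--     Returns:
--         Tupla `(paso, offset)` que define una permutación biyectiva.
--     """
--     paso = int((K_r & 0xFF) % n)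
--     if paso == 0:
--         paso = 1
--
--     cnt = 0
--     while _mcd(paso, n) != 1:
--         paso = (paso + 1) % n
--         if paso == 0:
--             paso = 1
--         cnt += 1
--         if cnt > n:
--             paso = 1
--             break
--
--     offset = int((K_r >> 8) % n)
--     return paso, offset
--
-- def transposicion_inversa(bloque: str, K_r: int) -> str:
--     """Revierte la permutación aplicada en `transposicion`.
--
--     Args:
--         bloque: Estado transpuesto.
--         K_r: Subclave de ronda usada en la fase directa.
--
--     Returns:
--         Estado original antes de la transposición.
--     """
--     n = len(bloque)
--     if n == 0:
--         return bloque
--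
--     paso, offset = _params_transposicion(K_r, n)
--     inv = "?" * n
--     for j in range(n):
--         fuente = (j * paso + offset) % n
--         inv = inv[:fuente] + bloque[j] + inv[fuente + 1 :]
--     return inv
-- ===== SOURCE B (Python) =====
-- def _mcd(a: int, b: int) -> int:
--     while b:
--         a, b = b, a % b
--     return a
--
-- def _params_transposicion(K_r: int, n: int) -> tuple:
--     paso = int((K_r & 0xFF) % n)
--     if paso == 0:
--         paso = 1
--     cnt = 0
--     while _mcd(paso, n) != 1:
--         paso = (paso + 1) % n
--         if paso == 0:
--             paso = 1
--         cnt += 1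
--         if cnt > n:
--             paso = 1
--             break
--     offset = int((K_r >> 8) % n)
--     return paso, offset
--
-- def transposicion_inversa(bloque: str, K_r: int) -> str:
--     # Sort-by-destination: tag each character with its target index, sort the
--     # tagged pairs by that index, and read the characters off in order.
--     n = len(bloque)
--     if n == 0:
--         return bloque
--     paso, offset = _params_transposicion(K_r, n)
--     pares = [((j * paso + offset) % n, c) for j, c in enumerate(bloque)]
--     pares.sort(key=lambda p: p[0])
--     return ''.join(c for _, c in pares)
-- ===== Notes on version B (the rewrite author's own statement) =====
-- stated objective: faster
-- what changed: A scatters characters into place by rebuilding the whole string with slice concatenation at every step (quadratic); B tags each character with its destination index, sorts the (index, char) pairs by key, and joins the characters once.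
import Mathlib
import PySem

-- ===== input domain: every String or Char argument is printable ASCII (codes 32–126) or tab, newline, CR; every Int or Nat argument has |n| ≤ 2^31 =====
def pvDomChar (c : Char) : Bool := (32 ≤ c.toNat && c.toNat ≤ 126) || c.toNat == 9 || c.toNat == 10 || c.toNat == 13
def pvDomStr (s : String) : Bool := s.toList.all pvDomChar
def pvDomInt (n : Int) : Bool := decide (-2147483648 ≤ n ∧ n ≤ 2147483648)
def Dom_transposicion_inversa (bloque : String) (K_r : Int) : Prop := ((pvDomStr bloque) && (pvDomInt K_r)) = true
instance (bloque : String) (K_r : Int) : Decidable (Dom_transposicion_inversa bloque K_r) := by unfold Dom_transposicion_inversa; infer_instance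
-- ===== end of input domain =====

-- B replaces A's quadratic string-splice scatter by sort-by-destination: tag each character
-- with its target index, sort the pairs by that key, and join the characters once.

-- ===== PORT A =====
-- _mcd: Euclid's algorithm; Python '%' is PySem.Int.mod
def pyMcd (a b : Int) : Int :=
  if _hb : b = 0 then a else pyMcd b (PySem.Int.mod a b)
termination_by b.natAbs
decreasing_by
  rcases lt_trichotomy b 0 with h | h | h
  · have := PySem.Int.mod_neg_bounds a h; omega
  · exact absurd h _hb
  · have h1 := PySem.Int.mod_nonneg a h; have h2 := PySem.Int.mod_lt a h; omega

-- the 'while _mcd(paso, n) != 1' loop of _params_transposicion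
def pasoLoop (n paso cnt : Int) : Int :=
  if pyMcd paso n ≠ 1 then
    let p := PySem.Int.mod (paso + 1) n
    let p := if p = 0 then 1 else p
    let cnt' := cnt + 1
    if _hgt : cnt' > n then 1
    else pasoLoop n p cnt'
  else paso
termination_by (n - cnt).toNat
decreasing_by omega

def paramsTransposicion (K_r n : Int) : Int × Int :=
  let paso := PySem.Int.mod (PySem.Int.band K_r 255) n
  let paso := if paso = 0 then 1 else paso
  let paso := pasoLoop n paso 0
  let offset := PySem.Int.mod (K_r >>> 8) n   -- Python 'K_r >> 8' is Int's arithmetic >>>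
  (paso, offset)

def transposicion_inversa (bloque : String) (K_r : Int) : String :=
  let cs := bloque.toList
  let n : Int := cs.length
  if n = 0 then bloque
  else
    let po := paramsTransposicion K_r n
    let inv := PySem.List.pyRepeat ['?'] n        -- "?" * n
    let inv := (PySem.List.pyRange 0 n 1).foldl
      (fun inv j =>
        let fuente := PySem.Int.mod (j * po.1 + po.2) n
        -- inv = inv[:fuente] + bloque[j] + inv[fuente+1:]  (j always in range, so pyGetD is exact)
        PySem.List.slice inv none (some fuente) ++ [PySem.List.pyGetD cs j '?']
          ++ PySem.List.slice inv (some (fuente + 1)) none) inv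
    String.ofList inv

-- ===== PORT B =====
def transposicion_inversa_alt (bloque : String) (K_r : Int) : String :=
  let cs := bloque.toList
  let n : Int := cs.length
  if n = 0 then bloque
  else
    let po := paramsTransposicion K_r n
    -- pares = [((j*paso+offset) % n, c) for j, c in enumerate(bloque)]
    let pares := (PySem.List.enumerate cs 0).map
      (fun p => (PySem.Int.mod (p.1 * po.1 + po.2) n, p.2))
    -- pares.sort(key=lambda p: p[0])
    let pares := PySem.List.sorted pares (fun p => p.1) false
    -- ''.join(c for _, c in pares)
    String.ofList (pares.map (fun p => p.2))

-- ===== PRECONDITION & SPEC =====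
def Spec_transposicion_inversa (bloque : String) (K_r : Int) (out : String) : Prop := out = transposicion_inversa_alt bloque K_r
instance (bloque : String) (K_r : Int) (out : String) : Decidable (Spec_transposicion_inversa bloque K_r out) := by unfold Spec_transposicion_inversa; infer_instance

-- ===== CLAIM (what is proved, stated in full; the proofs are below) =====
def Claim_equal_transposicion_inversa : Prop := ∀ (bloque : String) (K_r : Int), Dom_transposicion_inversa bloque K_r → Spec_transposicion_inversa bloque K_r (transposicion_inversa bloque K_r)

-- ===== LEMMAS AND PROOFS =====

-- A's string splice at an in-range position is exactly a list 'set'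
lemma splice_eq_set (inv : List Char) (f : Int) (c : Char)
    (h0 : 0 ≤ f) (h1 : f < inv.length) :
    PySem.List.slice inv none (some f) ++ [c] ++ PySem.List.slice inv (some (f + 1)) none
      = PySem.List.pySetD inv f c := by
  rw [PySem.List.slice_to inv h0, PySem.List.slice_from inv (by omega), PySem.List.pySetD_of_nonneg inv c h0]
  have hf : (f + 1).toNat = f.toNat + 1 := by omega
  rw [hf, List.set_eq_take_append_cons_drop, if_pos (by omega)]
  simp

-- A's splice loop is the scatter fold of pySetD over enumerate
lemma fold_eq (cs : List Char) (paso offset : Int) (L : Nat) (hL : L = cs.length) (hpos : 0 < L) :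
    ∀ (tail : List Char) (k : Nat), cs.drop k = tail → ∀ (inv : List Char), inv.length = L →
    (PySem.List.pyRange (k : Int) (L : Int) 1).foldl
      (fun inv j =>
        let fuente := PySem.Int.mod (j * paso + offset) (L : Int)
        PySem.List.slice inv none (some fuente) ++ [PySem.List.pyGetD cs j '?']
          ++ PySem.List.slice inv (some (fuente + 1)) none) inv
    = (PySem.List.enumerate tail (k : Int)).foldl
      (fun res p => PySem.List.pySetD res (PySem.Int.mod (p.1 * paso + offset) (L : Int)) p.2) inv := by
  intro tail
  induction tail with
  | nil =>
    intro k hdrop inv hlen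
    have hk : L ≤ k := by
      by_contra h
      have : cs.drop k ≠ [] := by
        apply List.ne_nil_of_length_pos; rw [List.length_drop]; omega
      exact this hdrop
    have : PySem.List.pyRange (k : Int) (L : Int) 1 = [] := by
      simp [PySem.List.pyRange]; omega
    simp [this, PySem.List.enumerate]
  | cons c tail ih =>
    intro k hdrop inv hlen
    have hk : k < L := by
      by_contra h
      have : cs.drop k = [] := List.drop_eq_nil_of_le (by omega)
      rw [this] at hdrop; exact (List.cons_ne_nil c tail) hdrop.symm
    rw [PySem.List.pyRange_one_cons (by exact_mod_cast hk), PySem.List.enumerate_cons]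
    simp only [List.foldl_cons]
    have hget : PySem.List.pyGetD cs (k : Int) '?' = c := by
      rw [PySem.List.pyGetD_natCast]
      have h : (cs.drop k)[0]? = cs[k + 0]? := List.getElem?_drop
      rw [hdrop] at h
      have h2 : cs[k]? = some c := by simpa using h.symm
      simp [List.getD, h2]
    have hf0 := PySem.Int.mod_nonneg ((k : Int) * paso + offset) (b := (L : Int)) (by exact_mod_cast hpos)
    have hf1 := PySem.Int.mod_lt ((k : Int) * paso + offset) (b := (L : Int)) (by exact_mod_cast hpos)
    rw [hget, splice_eq_set _ _ _ hf0 (by rw [hlen]; exact_mod_cast hf1)]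
    have hlen' : (PySem.List.pySetD inv (PySem.Int.mod ((k : Int) * paso + offset) (L : Int)) c).length = L := by
      rw [PySem.List.pySetD_of_nonneg inv c hf0, List.length_set, hlen]
    have hdrop' : cs.drop (k + 1) = tail := by
      rw [← List.drop_drop, hdrop]; simp
    have := ih (k + 1) hdrop' _ hlen'
    rw [show ((k : Int) + 1) = ((k + 1 : Nat) : Int) by push_cast; ring] at *
    exact this

-- pyMcd on nonnegative arguments is the mathematical gcd
lemma pyMcd_eq_gcd (a b : Int) (ha : 0 ≤ a) (hb : 0 ≤ b) : pyMcd a b = (Int.gcd a b : Int) := by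
  induction a, b using pyMcd.induct with
  | case1 a =>
    rw [pyMcd]
    simp only [Int.gcd_zero_right]
    exact (Int.natAbs_of_nonneg ha).symm
  | case2 a b hb0 ih =>
    have hbpos : 0 < b := lt_of_le_of_ne hb (Ne.symm hb0)
    rw [pyMcd, dif_neg hb0, PySem.Int.mod_eq_emod_of_pos hbpos]
    rw [PySem.Int.mod_eq_emod_of_pos hbpos] at ih
    have hg : b.gcd (a % b) = a.gcd b := by rw [Int.gcd_comm, Int.gcd_emod]
    rw [ih hb (Int.emod_nonneg a (by omega)), hg]

-- pasoLoop returns a nonnegative value coprime with n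
lemma pasoLoop_spec (n : Int) (hn : 0 < n) :
    ∀ paso cnt, 0 ≤ paso → 0 ≤ pasoLoop n paso cnt ∧ Int.gcd (pasoLoop n paso cnt) n = 1 := by
  intro paso cnt
  induction paso, cnt using pasoLoop.induct n with
  | case1 paso cnt hne cnt' hgt =>
    intro _
    rw [pasoLoop, if_pos hne, dif_pos (show cnt + 1 > n from hgt)]
    exact ⟨by omega, by simp⟩
  | case2 paso cnt hne p p' cnt' hgt ih =>
    intro _
    rw [pasoLoop, if_pos hne, dif_neg (show ¬cnt + 1 > n from hgt)]
    apply ih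
    have hmm := PySem.Int.mod_nonneg (paso + 1) hn
    show (0:Int) ≤ if PySem.Int.mod (paso + 1) n = 0 then 1 else PySem.Int.mod (paso + 1) n
    split <;> omega
  | case3 paso cnt h1 =>
    intro hp
    rw [pasoLoop, if_neg h1]
    rw [not_ne_iff] at h1
    refine ⟨hp, ?_⟩
    have h2 := pyMcd_eq_gcd paso n hp (by omega)
    rw [h2] at h1
    exact_mod_cast h1

-- paramsTransposicion: paso nonnegative and coprime with n, offset in [0, n)
lemma params_spec (K_r n : Int) (hn : 0 < n) :
    0 ≤ (paramsTransposicion K_r n).1 ∧ Int.gcd (paramsTransposicion K_r n).1 n = 1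
      ∧ 0 ≤ (paramsTransposicion K_r n).2 ∧ (paramsTransposicion K_r n).2 < n := by
  unfold paramsTransposicion
  have h0 := PySem.Int.mod_nonneg (PySem.Int.band K_r 255) hn
  have hps := pasoLoop_spec n hn
    (if PySem.Int.mod (PySem.Int.band K_r 255) n = 0 then 1 else PySem.Int.mod (PySem.Int.band K_r 255) n) 0
    (by split <;> omega)
  exact ⟨hps.1, hps.2, PySem.Int.mod_nonneg _ hn, PySem.Int.mod_lt _ hn⟩

-- pyGetD/pySetD at distinct nonnegative indices do not interact
lemma pyGetD_pySetD_ne (res : List Char) (i j : Int) (v : Char)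
    (h0 : 0 ≤ i) (hj : 0 ≤ j) (hne : j ≠ i) :
    PySem.List.pyGetD (PySem.List.pySetD res j v) i '?' = PySem.List.pyGetD res i '?' := by
  rw [PySem.List.pySetD_of_nonneg res v hj, PySem.List.pyGetD_of_nonneg _ '?' h0,
    PySem.List.pyGetD_of_nonneg res '?' h0]
  have hne' : j.toNat ≠ i.toNat := by omega
  simp [List.getD, List.getElem?_set_ne hne']

-- a scatter fold does not change positions it never writes
lemma scatter_untouched (f : Int → Int) (ps : List (Int × Char)) :
    ∀ (res : List Char) (i : Int), 0 ≤ i →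
    (∀ p ∈ ps, 0 ≤ f p.1) → (∀ p ∈ ps, f p.1 ≠ i) →
    PySem.List.pyGetD (ps.foldl (fun r q => PySem.List.pySetD r (f q.1) q.2) res) i '?'
      = PySem.List.pyGetD res i '?' := by
  induction ps with
  | nil => intro res i _ _ _; rfl
  | cons q ps ih =>
    intro res i h0 hnn hne
    simp only [List.foldl_cons]
    rw [ih _ i h0 (fun p hp => hnn p (List.mem_cons_of_mem q hp))
      (fun p hp => hne p (List.mem_cons_of_mem q hp))]
    exact pyGetD_pySetD_ne res i (f q.1) q.2 h0 (hnn q List.mem_cons_self) (hne q List.mem_cons_self)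

-- scatter fold preserves length
lemma scatter_length (f : Int → Int) (ps : List (Int × Char)) :
    ∀ res : List Char,
    (ps.foldl (fun r q => PySem.List.pySetD r (f q.1) q.2) res).length = res.length := by
  induction ps with
  | nil => intro res; rfl
  | cons q ps ih =>
    intro res
    simp only [List.foldl_cons]
    rw [ih, PySem.List.length_pySetD]

-- with pairwise-distinct in-range destinations, a scatter fold stores every character
lemma scatter_get (f : Int → Int) (ps : List (Int × Char)) :
    ∀ res : List Char,
    (ps.map (fun p => f p.1)).Nodup →
    (∀ p ∈ ps, 0 ≤ f p.1 ∧ f p.1 < res.length) →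
    ∀ p ∈ ps, PySem.List.pyGetD (ps.foldl (fun r q => PySem.List.pySetD r (f q.1) q.2) res) (f p.1) '?' = p.2 := by
  induction ps with
  | nil => intro res _ _ p hp; exact absurd hp (List.not_mem_nil)
  | cons q ps ih =>
    intro res hnd hbnd p hp
    rw [List.map_cons, List.nodup_cons] at hnd
    simp only [List.foldl_cons]
    rcases List.mem_cons.mp hp with rfl | hp'
    · have hnot : ∀ r ∈ ps, f r.1 ≠ f p.1 := by
        intro r hr heq
        exact hnd.1 (List.mem_map.mpr ⟨r, hr, heq⟩)
      rw [scatter_untouched f ps _ _ (hbnd p hp).1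
        (fun r hr => (hbnd r (List.mem_cons_of_mem p hr)).1) hnot]
      have h0 := (hbnd p hp).1
      have h1 := (hbnd p hp).2
      rw [PySem.List.pySetD_of_nonneg res p.2 h0, PySem.List.pyGetD_of_nonneg _ '?' h0]
      have hlt : (f p.1).toNat < res.length := by omega
      simp [List.getD, List.getElem?_set_self hlt]
    · apply ih _ hnd.2
      · intro r hr
        rw [PySem.List.length_pySetD]
        exact hbnd r (List.mem_cons_of_mem q hr)
      · exact hp'

-- the destination map is injective on its domain
lemma dest_inj (s o n : Int) (hn : 0 < n) (hco : Int.gcd s n = 1)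
    (j1 j2 : Int) (h : PySem.Int.mod (j1 * s + o) n = PySem.Int.mod (j2 * s + o) n)
    (hb1 : 0 ≤ j1 ∧ j1 < n) (hb2 : 0 ≤ j2 ∧ j2 < n) : j1 = j2 := by
  rw [PySem.Int.mod_eq_emod_of_pos hn, PySem.Int.mod_eq_emod_of_pos hn] at h
  have hdvd : n ∣ (j2 - j1) * s := by
    have : n ∣ (j2 * s + o) - (j1 * s + o) := Int.ModEq.dvd h
    have he : (j2 * s + o) - (j1 * s + o) = (j2 - j1) * s := by ring
    rwa [he] at this
  have hcop : IsCoprime n s := by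
    rw [Int.isCoprime_iff_gcd_eq_one, Int.gcd_comm]
    exact hco
  have : n ∣ j2 - j1 := hcop.dvd_of_dvd_mul_right hdvd
  have habs : |j2 - j1| < n := abs_sub_lt_iff.mpr ⟨by omega, by omega⟩
  have := Int.eq_zero_of_abs_lt_dvd this habs
  omega

-- the scatter fold is exactly the sort-by-destination list
lemma scatter_eq_sorted (cs : List Char) (s o : Int) (hpos : 0 < cs.length)
    (hco : Int.gcd s (cs.length : Int) = 1) :
    (PySem.List.enumerate cs 0).foldl
      (fun res p => PySem.List.pySetD res (PySem.Int.mod (p.1 * s + o) (cs.length : Int)) p.2)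
      (List.replicate cs.length '?')
    = (PySem.List.sorted ((PySem.List.enumerate cs 0).map
        (fun p => (PySem.Int.mod (p.1 * s + o) (cs.length : Int), p.2))) (fun p => p.1) false).map
        (fun p => p.2) := by
  have hnpos : 0 < (cs.length : Int) := by exact_mod_cast hpos
  have hlen : PySem.List.len cs = (cs.length : Int) := by simp [PySem.List.len]
  have hps : PySem.List.enumerate cs 0
      = (PySem.List.pyRange 0 (cs.length : Int)).map (fun j => (j, PySem.List.pyGetD cs j '?')) := by
    rw [PySem.List.enumerate_eq_map_pyRange cs '?', hlen]
  have hrange_mem : ∀ j ∈ PySem.List.pyRange (0 : Int) (cs.length : Int), 0 ≤ j ∧ j < (cs.length : Int) :=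
    fun j hj => PySem.List.mem_pyRange_one.mp hj
  have hrange_nodup : (PySem.List.pyRange (0 : Int) (cs.length : Int)).Nodup := by
    rw [PySem.List.pyRange_zero_natCast]
    exact List.Nodup.map (fun a b h => by exact_mod_cast h) List.nodup_range
  have hmap_nodup : ((PySem.List.pyRange (0 : Int) (cs.length : Int)).map
      (fun j => PySem.Int.mod (j * s + o) (cs.length : Int))).Nodup :=
    List.Nodup.map_on
      (fun x hx y hy hxy => dest_inj s o (cs.length : Int) hnpos hco x y hxy (hrange_mem x hx) (hrange_mem y hy))
      hrange_nodup
  have hf_bnd : ∀ j : Int, 0 ≤ PySem.Int.mod (j * s + o) (cs.length : Int)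
      ∧ PySem.Int.mod (j * s + o) (cs.length : Int) < (cs.length : Int) :=
    fun j => ⟨PySem.Int.mod_nonneg _ hnpos, PySem.Int.mod_lt _ hnpos⟩
  have hnodup_ps : ((PySem.List.enumerate cs 0).map
      (fun p => PySem.Int.mod (p.1 * s + o) (cs.length : Int))).Nodup := by
    rw [hps, List.map_map]
    exact hmap_nodup
  have hbnd_ps : ∀ p ∈ PySem.List.enumerate cs 0,
      0 ≤ PySem.Int.mod (p.1 * s + o) (cs.length : Int)
      ∧ PySem.Int.mod (p.1 * s + o) (cs.length : Int) < ((List.replicate cs.length '?').length : Int) := by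
    intro p _
    simpa using hf_bnd p.1
  -- the scatter result
  have hRget : ∀ p ∈ PySem.List.enumerate cs 0,
      PySem.List.pyGetD ((PySem.List.enumerate cs 0).foldl
        (fun res q => PySem.List.pySetD res (PySem.Int.mod (q.1 * s + o) (cs.length : Int)) q.2)
        (List.replicate cs.length '?')) (PySem.Int.mod (p.1 * s + o) (cs.length : Int)) '?' = p.2 :=
    scatter_get (fun j => PySem.Int.mod (j * s + o) (cs.length : Int)) (PySem.List.enumerate cs 0)
      (List.replicate cs.length '?') hnodup_ps hbnd_ps
  have hRlen : ((PySem.List.enumerate cs 0).foldl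
      (fun res q => PySem.List.pySetD res (PySem.Int.mod (q.1 * s + o) (cs.length : Int)) q.2)
      (List.replicate cs.length '?')).length = cs.length := by
    rw [scatter_length (fun j => PySem.Int.mod (j * s + o) (cs.length : Int)) (PySem.List.enumerate cs 0)
      (List.replicate cs.length '?'), List.length_replicate]
  set R := (PySem.List.enumerate cs 0).foldl
      (fun res q => PySem.List.pySetD res (PySem.Int.mod (q.1 * s + o) (cs.length : Int)) q.2)
      (List.replicate cs.length '?') with hRdef
  -- the tagged pairs, re-expressed through R
  have step3 : (PySem.List.enumerate cs 0).map
      (fun p => (PySem.Int.mod (p.1 * s + o) (cs.length : Int), p.2))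
      = ((PySem.List.pyRange 0 (cs.length : Int)).map
          (fun j => PySem.Int.mod (j * s + o) (cs.length : Int))).map
          (fun i => (i, PySem.List.pyGetD R i '?')) := by
    rw [hps, List.map_map, List.map_map]
    apply List.map_congr_left
    intro j hj
    show (PySem.Int.mod (j * s + o) (cs.length : Int), PySem.List.pyGetD cs j '?')
      = (PySem.Int.mod (j * s + o) (cs.length : Int), PySem.List.pyGetD R (PySem.Int.mod (j * s + o) (cs.length : Int)) '?')
    have hpmem : (j, PySem.List.pyGetD cs j '?') ∈ PySem.List.enumerate cs 0 := by
      rw [hps]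
      exact List.mem_map.mpr ⟨j, hj, rfl⟩
    have := hRget (j, PySem.List.pyGetD cs j '?') hpmem
    simp only at this
    rw [this]
  have step4 : ((PySem.List.pyRange 0 (cs.length : Int)).map
      (fun j => PySem.Int.mod (j * s + o) (cs.length : Int))).Perm (PySem.List.pyRange 0 (cs.length : Int)) := by
    apply List.Subperm.perm_of_length_le
    · apply List.subperm_of_subset hmap_nodup
      intro x hx
      obtain ⟨j, _, rfl⟩ := List.mem_map.mp hx
      exact PySem.List.mem_pyRange_one.mpr (hf_bnd j)
    · simp
  have step5 : PySem.List.enumerate R 0 = (PySem.List.pyRange 0 (cs.length : Int)).map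
      (fun i => (i, PySem.List.pyGetD R i '?')) := by
    rw [PySem.List.enumerate_eq_map_pyRange R '?',
      show PySem.List.len R = (cs.length : Int) by simp [PySem.List.len, hRlen]]
  have step6 : (PySem.List.enumerate R 0).Perm ((PySem.List.enumerate cs 0).map
      (fun p => (PySem.Int.mod (p.1 * s + o) (cs.length : Int), p.2))) := by
    rw [step5, step3]
    exact (step4.map (fun i => (i, PySem.List.pyGetD R i '?'))).symm
  have step7 := PySem.List.sorted_eq_of_perm_of_pairwise_lt
    ((PySem.List.enumerate cs 0).map (fun p => (PySem.Int.mod (p.1 * s + o) (cs.length : Int), p.2)))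
    (PySem.List.enumerate R 0) (fun p => p.1) step6 (PySem.List.pairwise_lt_enumerate R 0)
  rw [step7, PySem.List.map_snd_enumerate]

-- ===== VERDICT (by name: the statement is the Claim_ definition above) =====
theorem transposicion_inversa_spec : Claim_equal_transposicion_inversa := by
  intro bloque K_r _
  unfold Spec_transposicion_inversa transposicion_inversa transposicion_inversa_alt
  dsimp only []
  by_cases h : ((bloque.toList.length : Int) = 0)
  · rw [if_pos h, if_pos h]
  · have hpos : 0 < bloque.toList.length := by omega
    have hnpos : 0 < (bloque.toList.length : Int) := by exact_mod_cast hpos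
    have hpar := params_spec K_r (bloque.toList.length : Int) hnpos
    rw [if_neg h, if_neg h, PySem.List.pyRepeat_singleton, Int.toNat_natCast]
    exact congrArg String.ofList
      ((fold_eq bloque.toList (paramsTransposicion K_r (bloque.toList.length : Int)).1
          (paramsTransposicion K_r (bloque.toList.length : Int)).2 bloque.toList.length rfl hpos
          bloque.toList 0 (by simp) (List.replicate bloque.toList.length '?') (by simp)).trans
        (scatter_eq_sorted bloque.toList (paramsTransposicion K_r (bloque.toList.length : Int)).1
          (paramsTransposicion K_r (bloque.toList.length : Int)).2 hpos hpar.2.1))
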